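-- pv_equiv track=rewrite | github.com/Trafero-App/Trafero | helper/nearby.py | find_all_chains
-- ===== SOURCE A (Python) =====
-- from collections import namedtuple
--
-- Chain = namedtuple("Chain", ["route1_id", "route1_intersection", "route2_id", "route2_intersection", "pickup_index", "dest_index"])
--
-- def find_all_chains(intersection_data, routes_A, routes_B):
--     """
--     Find all combinations of chained routes.
--
--     Parameters:
--     - intersections data: All info about intersections between routes.
--     - nearby_A: all routes nearby A.
--     - nearby_B: all routes nearby B.
--
--     Returns:
--     All combinations of chained routes.
--
--     """
--     valid_chains = []
--     for id_A in routes_A: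
--         if id_A in routes_B: continue
--         for id_B in routes_B:
--             if id_B in routes_A: continue
--             pickup_index, destination_index = routes_A[id_A], routes_B[id_B]
--             for route1_id, route1_intersection, route2_id, route2_intersection in intersection_data:
--                     if route1_id != id_A or route2_id != id_B: continue
--                     if pickup_index > route1_intersection or destination_index < route2_intersection: continue
--                     chain = Chain(route1_id, route1_intersection, route2_id, route2_intersection, pickup_index, destination_index)
--                     valid_chains.append(chain)
--
--     return valid_chains
-- ===== SOURCE B (Python) =====
-- def find_all_chains(intersection_data, routes_A, routes_B):
--     """Same result as A, but intersection_data is indexed once by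
--     (route1_id, route2_id), so each (id_A, id_B) pair does a dict lookup
--     instead of a scan of the whole intersection list."""
--     index = {}
--     for r1, i1, r2, i2 in intersection_data:
--         index.setdefault((r1, r2), []).append((i1, i2))
--     chains = []
--     for id_A, pickup in routes_A.items():
--         if id_A in routes_B:
--             continue
--         for id_B, dest in routes_B.items():
--             if id_B in routes_A:
--                 continue
--             for i1, i2 in index.get((id_A, id_B), []):
--                 if pickup <= i1 and dest >= i2:
--                     chains.append((id_A, i1, id_B, i2, pickup, dest))
--     return chains
-- ===== Notes on version B (the rewrite author's own statement) =====
-- stated objective: faster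
-- what changed: intersection_data is grouped once into a dict keyed by (route1_id, route2_id), so the per-(id_A,id_B) inner scan of the whole intersection list is replaced by one dict lookup over only the matching intersections.
import Mathlib
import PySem

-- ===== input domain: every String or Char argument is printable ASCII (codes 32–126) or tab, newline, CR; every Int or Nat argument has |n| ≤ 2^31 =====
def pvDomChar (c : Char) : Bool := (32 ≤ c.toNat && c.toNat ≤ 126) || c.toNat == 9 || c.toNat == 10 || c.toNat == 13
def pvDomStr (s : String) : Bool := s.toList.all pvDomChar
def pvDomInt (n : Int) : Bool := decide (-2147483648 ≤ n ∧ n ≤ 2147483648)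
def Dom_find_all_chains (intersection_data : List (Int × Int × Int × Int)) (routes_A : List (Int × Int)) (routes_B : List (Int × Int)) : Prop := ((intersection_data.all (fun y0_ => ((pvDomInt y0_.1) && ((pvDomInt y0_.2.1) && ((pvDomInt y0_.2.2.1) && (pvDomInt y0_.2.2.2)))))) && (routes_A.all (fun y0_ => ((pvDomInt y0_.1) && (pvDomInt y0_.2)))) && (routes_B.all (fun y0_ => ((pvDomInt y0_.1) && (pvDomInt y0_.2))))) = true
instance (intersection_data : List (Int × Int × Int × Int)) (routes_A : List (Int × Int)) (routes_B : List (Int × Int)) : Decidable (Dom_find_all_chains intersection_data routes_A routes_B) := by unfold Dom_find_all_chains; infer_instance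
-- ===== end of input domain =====

-- B groups intersection_data once into a dict keyed by (route1_id, route2_id), replacing A's
-- per-(id_A,id_B) scan of the whole intersection list by a lookup; return values are equal.

-- ===== PORT A =====
def find_all_chains (intersection_data : List (Int × Int × Int × Int)) (routes_A : List (Int × Int)) (routes_B : List (Int × Int)) : List (Int × Int × Int × Int × Int × Int) :=
  let dA : PySem.Dict Int Int := PySem.Dict.ofList routes_A
  let dB : PySem.Dict Int Int := PySem.Dict.ofList routes_B
  dA.items.foldl (fun acc pA =>
    if dB.contains pA.1 then acc else
    dB.items.foldl (fun acc2 pB =>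
      if dA.contains pB.1 then acc2 else
      intersection_data.foldl (fun acc3 q =>
        if q.1 ≠ pA.1 ∨ q.2.2.1 ≠ pB.1 then acc3
        else if pA.2 > q.2.1 ∨ pB.2 < q.2.2.2 then acc3
        else acc3 ++ [(q.1, q.2.1, q.2.2.1, q.2.2.2, pA.2, pB.2)]) acc2) acc) []

-- ===== PORT B =====
-- the index dict: setdefault((r1,r2),[]).append((i1,i2)) for each intersection, in order
def pvBuildIndex (intersection_data : List (Int × Int × Int × Int)) : PySem.Dict (Int × Int) (List (Int × Int)) :=
  intersection_data.foldl (fun d q => d.modify (q.1, q.2.2.1) [] (fun l => l ++ [(q.2.1, q.2.2.2)])) PySem.Dict.empty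

def find_all_chains_alt (intersection_data : List (Int × Int × Int × Int)) (routes_A : List (Int × Int)) (routes_B : List (Int × Int)) : List (Int × Int × Int × Int × Int × Int) :=
  let index := pvBuildIndex intersection_data
  let dA := PySem.Dict.ofList routes_A
  let dB := PySem.Dict.ofList routes_B
  dA.items.foldl (fun acc pA =>
    if dB.contains pA.1 then acc else
    dB.items.foldl (fun acc2 pB =>
      if dA.contains pB.1 then acc2 else
      (index.getD (pA.1, pB.1) []).foldl (fun acc3 r =>
        if pA.2 ≤ r.1 ∧ pB.2 ≥ r.2 then acc3 ++ [(pA.1, r.1, pB.1, r.2, pA.2, pB.2)] else acc3) acc2) acc) []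

-- ===== PRECONDITION & SPEC =====
def Spec_find_all_chains (intersection_data : List (Int × Int × Int × Int)) (routes_A : List (Int × Int)) (routes_B : List (Int × Int)) (out : List (Int × Int × Int × Int × Int × Int)) : Prop := out = find_all_chains_alt intersection_data routes_A routes_B
instance (intersection_data : List (Int × Int × Int × Int)) (routes_A : List (Int × Int)) (routes_B : List (Int × Int)) (out : List (Int × Int × Int × Int × Int × Int)) : Decidable (Spec_find_all_chains intersection_data routes_A routes_B out) := by unfold Spec_find_all_chains; infer_instance

-- ===== CLAIM (what is proved, stated in full; the proofs are below) =====
def Claim_equal_find_all_chains : Prop := ∀ (intersection_data : List (Int × Int × Int × Int)) (routes_A : List (Int × Int)) (routes_B : List (Int × Int)), Dom_find_all_chains intersection_data routes_A routes_B → Spec_find_all_chains intersection_data routes_A routes_B (find_all_chains intersection_data routes_A routes_B)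

-- ===== LEMMAS AND PROOFS =====

-- the grouped index looked up at (a, b) is exactly the (i1, i2) pairs of the matching intersections, in order
lemma pvBuildIndex_getD (intersection_data : List (Int × Int × Int × Int)) (a b : Int) :
    (pvBuildIndex intersection_data).getD (a, b) [] =
      (intersection_data.filter (fun q => decide (q.1 = a ∧ q.2.2.1 = b))).map (fun q => (q.2.1, q.2.2.2)) := by
  have H : ∀ (l : List (Int × Int × Int × Int)) (d : PySem.Dict (Int × Int) (List (Int × Int))),
      (l.foldl (fun d q => d.modify (q.1, q.2.2.1) [] (fun l => l ++ [(q.2.1, q.2.2.2)])) d).getD (a, b) [] =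
        d.getD (a, b) [] ++ (l.filter (fun q => decide (q.1 = a ∧ q.2.2.1 = b))).map (fun q => (q.2.1, q.2.2.2)) := by
    intro l
    induction l with
    | nil => simp
    | cons q t ih =>
      intro d
      simp only [List.foldl_cons, ih, List.filter_cons]
      rw [PySem.Dict.getD_modify]
      by_cases h : q.1 = a ∧ q.2.2.1 = b
      · have : ((a, b) : Int × Int) = (q.1, q.2.2.1) := by cases h; simp [*]
        simp [this, h, List.append_assoc]
      · have hne : ((a, b) : Int × Int) ≠ (q.1, q.2.2.1) := by
          simp only [ne_eq, Prod.mk.injEq, not_and]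
          intro h1 h2
          exact h ⟨h1.symm, h2.symm⟩
        simp [hne, h]
  simpa [pvBuildIndex, PySem.Dict.getD_empty] using H intersection_data PySem.Dict.empty

-- A's inner scan collects exactly the matching, index-compatible intersections, appended to acc
lemma innerA (intersection_data : List (Int × Int × Int × Int)) (a pk b ds : Int) :
    ∀ acc, intersection_data.foldl (fun acc3 q =>
        if q.1 ≠ a ∨ q.2.2.1 ≠ b then acc3
        else if pk > q.2.1 ∨ ds < q.2.2.2 then acc3
        else acc3 ++ [(q.1, q.2.1, q.2.2.1, q.2.2.2, pk, ds)]) acc =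
      acc ++ (intersection_data.filter
          (fun q => decide ((q.1 = a ∧ q.2.2.1 = b) ∧ pk ≤ q.2.1 ∧ ds ≥ q.2.2.2))).map
        (fun q => (a, q.2.1, b, q.2.2.2, pk, ds)) := by
  induction intersection_data with
  | nil => simp
  | cons q t ih =>
    intro acc
    simp only [List.foldl_cons, List.filter_cons]
    by_cases h1 : q.1 = a ∧ q.2.2.1 = b
    · by_cases h2 : pk ≤ q.2.1 ∧ ds ≥ q.2.2.2
      · have : ¬ (q.1 ≠ a ∨ q.2.2.1 ≠ b) := by tauto
        have h2' : ¬ (pk > q.2.1 ∨ ds < q.2.2.2) := by omega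
        simp [h2', h1, h2, ih, List.append_assoc]
      · have : ¬ (q.1 ≠ a ∨ q.2.2.1 ≠ b) := by tauto
        have h2' : pk > q.2.1 ∨ ds < q.2.2.2 := by omega
        simp [h2', ih, h1, h2]
    · have h1' : q.1 ≠ a ∨ q.2.2.1 ≠ b := by tauto
      simp [h1', ih, h1]

-- B's filtered pass over the indexed bucket, appended to acc
lemma innerB (L : List (Int × Int)) (a pk b ds : Int) :
    ∀ acc, L.foldl (fun acc3 r =>
        if pk ≤ r.1 ∧ ds ≥ r.2 then acc3 ++ [(a, r.1, b, r.2, pk, ds)] else acc3) acc =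
      acc ++ (L.filter (fun r => decide (pk ≤ r.1 ∧ ds ≥ r.2))).map (fun r => (a, r.1, b, r.2, pk, ds)) := by
  induction L with
  | nil => simp
  | cons r t ih =>
    intro acc
    simp only [List.foldl_cons, List.filter_cons]
    by_cases h : pk ≤ r.1 ∧ ds ≥ r.2
    · simp [h, ih, List.append_assoc]
    · simp [h, ih]

-- ===== VERDICT (by name: the statement is the Claim_ definition above) =====
theorem find_all_chains_spec : Claim_equal_find_all_chains := by
  intro intersection_data routes_A routes_B _
  unfold Spec_find_all_chains find_all_chains find_all_chains_alt
  simp only []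
  apply PySem.List.foldl_congr_mem
  intro acc pA _
  by_cases hA : (PySem.Dict.ofList routes_B).contains pA.1
  · simp [hA]
  · simp only [hA, if_false, Bool.false_eq_true]
    apply PySem.List.foldl_congr_mem
    intro acc2 pB _
    by_cases hB : (PySem.Dict.ofList routes_A).contains pB.1
    · simp [hB]
    · simp only [hB, if_false, Bool.false_eq_true]
      rw [innerA intersection_data pA.1 pA.2 pB.1 pB.2 acc2,
          pvBuildIndex_getD intersection_data pA.1 pB.1,
          innerB _ pA.1 pA.2 pB.1 pB.2 acc2]
      rw [List.filter_map, List.map_map, List.filter_filter]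
      simp only [Function.comp_def]
      refine congrArg (fun l => acc2 ++ List.map (fun q : Int × Int × Int × Int => (pA.1, q.2.1, pB.1, q.2.2.2, pA.2, pB.2)) l) (List.filter_congr ?_)
      intro q _
      simp only [Bool.decide_and]
      exact Bool.and_comm _ _
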